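-- pv_equiv track=rewrite | github.com/DavidEngland/yet-another-number-scheme | ExactCompute.py | _to_continued_fraction
-- ===== SOURCE A (Python) =====
-- from typing import Dict, List, Union, Optional, Tuple, Any
--
-- def _to_continued_fraction(numerator: int, denominator: int) -> Tuple[int, ...]:
--     """Convert a rational number to its continued fraction representation"""
--     if denominator == 0:
--         raise ValueError("Denominator cannot be zero")
--
--     a, b = abs(numerator), abs(denominator)
--     terms = []
--
--     # Get the integer part
--     terms.append(a // b)
--     a %= b
--
--     # If there's a remainder, compute the continued fraction
--     while a:
--         a, b = b, a
--         terms.append(a // b)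
--         a %= b
--
--     return tuple(terms)
-- ===== SOURCE B (Python) =====
-- def _to_continued_fraction(numerator: int, denominator: int):
--     """Convert a rational number to its continued fraction representation"""
--     if denominator == 0:
--         raise ValueError("Denominator cannot be zero")
--
--     def go(a: int, b: int):
--         q, r = divmod(a, b)
--         if r == 0:
--             return (q,)
--         return (q,) + go(b, r)
--
--     return go(abs(numerator), abs(denominator))
-- ===== Notes on version B (the rewrite author's own statement) =====
-- stated objective: simpler
-- what changed: Replaced the explicit while-loop with swap-and-append state mutation by the natural recursive continued-fraction expansion go(a,b) = (a//b,) if a%b==0 else (a//b,)+go(b,a%b).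
import Mathlib
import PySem

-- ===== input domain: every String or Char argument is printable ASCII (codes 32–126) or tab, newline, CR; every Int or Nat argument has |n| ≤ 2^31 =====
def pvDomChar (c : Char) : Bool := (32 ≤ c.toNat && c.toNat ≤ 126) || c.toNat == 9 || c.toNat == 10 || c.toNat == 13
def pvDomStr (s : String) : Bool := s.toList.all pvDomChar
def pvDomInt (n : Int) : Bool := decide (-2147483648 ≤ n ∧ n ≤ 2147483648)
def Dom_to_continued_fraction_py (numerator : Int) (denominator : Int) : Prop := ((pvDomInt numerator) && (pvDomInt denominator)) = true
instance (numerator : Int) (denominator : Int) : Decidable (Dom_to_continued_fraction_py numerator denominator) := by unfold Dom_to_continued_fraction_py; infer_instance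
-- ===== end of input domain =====

-- B replaces A's explicit swap-and-mod while-loop with the natural recursive
-- continued-fraction expansion go(a,b) = (a//b,) [+ go(b, a%b) if a%b ≠ 0] (objective: simpler).


-- ===== PORT A =====
-- the 'while a:' loop; at loop entry the state is (a, b, terms); body: a,b = b,a; terms.append(a//b); a %= b
def pvLoopA (a b : Int) (terms : List Int) : List Int :=
  if h : a = 0 then terms
  else pvLoopA (PySem.Int.mod b a) a (terms ++ [PySem.Int.floordiv b a])
termination_by a.natAbs
decreasing_by
  rcases lt_or_gt_of_ne h with hn | hp
  · have := PySem.Int.mod_neg_bounds (a := b) hn; omega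
  · have h1 := PySem.Int.mod_nonneg (a := b) hp
    have h2 := PySem.Int.mod_lt (a := b) hp; omega

def to_continued_fraction_py (numerator : Int) (denominator : Int) : List Int :=
  if denominator = 0 then []  -- Python raises ValueError here; excluded by Pre_
  else
    let a := |numerator|
    let b := |denominator|
    let terms := [PySem.Int.floordiv a b]
    let a := PySem.Int.mod a b
    pvLoopA a b terms

-- ===== PORT B =====
-- recursive expansion: go(a,b) = (a//b,) if a%b == 0 else (a//b,) + go(b, a%b)
def pvGo (a b : Int) : List Int :=
  if hb0 : b = 0 then []  -- unreachable totality guard: the Python go is only called with b ≠ 0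
  else
    let q := PySem.Int.floordiv a b
    let r := PySem.Int.mod a b
    if _hr : r = 0 then [q]
    else q :: pvGo b r
termination_by b.natAbs
decreasing_by
  rcases lt_or_gt_of_ne hb0 with hn | hp
  · have := PySem.Int.mod_neg_bounds (a := a) hn; omega
  · have h1 := PySem.Int.mod_nonneg (a := a) hp
    have h2 := PySem.Int.mod_lt (a := a) hp; omega

def to_continued_fraction_py_alt (numerator : Int) (denominator : Int) : List Int :=
  if denominator = 0 then []  -- Python raises ValueError here; excluded by Pre_
  else pvGo |numerator| |denominator|

-- ===== PRECONDITION & SPEC =====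
-- Python A raises ValueError exactly when denominator == 0; Pre_ excludes that (B raises there too).
def Pre_to_continued_fraction_py (numerator : Int) (denominator : Int) : Prop := denominator ≠ 0
instance (numerator : Int) (denominator : Int) : Decidable (Pre_to_continued_fraction_py numerator denominator) := by unfold Pre_to_continued_fraction_py; infer_instance
def pvWitness_to_continued_fraction_py : Int × Int := (355, 113)
def Spec_to_continued_fraction_py (numerator : Int) (denominator : Int) (out : List Int) : Prop := out = to_continued_fraction_py_alt numerator denominator
instance (numerator : Int) (denominator : Int) (out : List Int) : Decidable (Spec_to_continued_fraction_py numerator denominator out) := by unfold Spec_to_continued_fraction_py; infer_instance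

-- ===== CLAIM (what is proved, stated in full; the proofs are below) =====
def Claim_equal_to_continued_fraction_py : Prop := ∀ (numerator : Int) (denominator : Int), Dom_to_continued_fraction_py numerator denominator → Pre_to_continued_fraction_py numerator denominator → Spec_to_continued_fraction_py numerator denominator (to_continued_fraction_py numerator denominator)

-- ===== LEMMAS AND PROOFS =====
-- A's loop on state (a%b, b, terms ++ [a//b]) produces exactly terms ++ go(a, b), for 0 < b.
theorem pvLoopA_eq_go : ∀ (k : Nat) (b : Int), b.natAbs ≤ k → 0 < b → ∀ (a : Int) (terms : List Int),
    pvLoopA (PySem.Int.mod a b) b (terms ++ [PySem.Int.floordiv a b]) = terms ++ pvGo a b := by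
  intro k
  induction k with
  | zero => intro b hbk hpos; omega
  | succ k ih =>
    intro b hbk hpos a terms
    have hrnn := PySem.Int.mod_nonneg (a := a) hpos
    have hrlt := PySem.Int.mod_lt (a := a) hpos
    rw [pvLoopA, pvGo]
    rw [dif_neg hpos.ne']
    by_cases hr : PySem.Int.mod a b = 0
    · simp [hr]
    · rw [dif_neg hr, dif_neg hr]
      have hrpos : 0 < PySem.Int.mod a b := lt_of_le_of_ne hrnn (Ne.symm hr)
      have hle : (PySem.Int.mod a b).natAbs ≤ k := by omega
      rw [ih _ hle hrpos b (terms ++ [PySem.Int.floordiv a b])]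
      simp

-- ===== VERDICT (by name: the statement is the Claim_ definition above) =====
theorem to_continued_fraction_py_spec : Claim_equal_to_continued_fraction_py := by
  intro n d _ hd
  unfold Spec_to_continued_fraction_py to_continued_fraction_py to_continued_fraction_py_alt
  simp only [if_neg hd]
  have hb : (0:Int) < |d| := abs_pos.mpr hd
  simpa using pvLoopA_eq_go |d|.natAbs |d| le_rfl hb |n| []
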